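-- pv_equiv track=rewrite | github.com/rheew/algorithm | stack, queue/string_zip_shortVersion.py | check
-- ===== SOURCE A (Python) =====
-- def check(text, slen):
--     textzip = [[text[i:i+slen]] for i in range(0,len(text),slen)]
--
--     cnt = 1
--     ans = ''
--     for a, b in zip(textzip, textzip[1:]+['']):
--         if a == b:
--             cnt += 1
--         else :
--             if cnt > 1: ans += str(cnt) + a[0]
--             else : ans += a[0]
--             cnt = 1
--     return ans
-- ===== SOURCE B (Python) =====
-- def check(text, slen):
--     chunks = [text[i:i+slen] for i in range(0, len(text), slen)]
--     parts = []
--     i = 0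
--     n = len(chunks)
--     while i < n:
--         j = i
--         while j < n and chunks[j] == chunks[i]:
--             j += 1
--         cnt = j - i
--         parts.append(str(cnt) + chunks[i] if cnt > 1 else chunks[i])
--         i = j
--     return ''.join(parts)
-- ===== Notes on version B (the rewrite author's own statement) =====
-- stated objective: alternative
-- what changed: Replaces A's shifted-zip lookahead over singleton-wrapped chunks with a '' sentinel and a running counter by a forward two-pointer run scanner over the plain chunk list that collects the encoded pieces in a list and joins them once.
import Mathlib
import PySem

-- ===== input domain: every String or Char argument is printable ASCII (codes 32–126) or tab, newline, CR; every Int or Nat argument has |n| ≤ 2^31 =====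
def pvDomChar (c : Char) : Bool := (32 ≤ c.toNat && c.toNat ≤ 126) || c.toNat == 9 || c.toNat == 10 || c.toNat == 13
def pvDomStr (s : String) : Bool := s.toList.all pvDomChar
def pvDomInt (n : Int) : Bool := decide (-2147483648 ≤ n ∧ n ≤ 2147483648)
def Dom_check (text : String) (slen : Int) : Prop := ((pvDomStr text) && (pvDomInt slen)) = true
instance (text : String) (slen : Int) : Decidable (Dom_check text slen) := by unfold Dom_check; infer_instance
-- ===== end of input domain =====

-- B replaces A's shifted-zip lookahead (with '' sentinel and running counter) by a forward
-- two-pointer run scanner over the plain chunk list, joining the encoded pieces at the end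
-- (objective: alternative, same cost).

-- ===== PORT A =====
-- the chunk list [text[i:i+slen] for i in range(0,len(text),slen)] (on code points)
def checkChunks (tl : List Char) (slen : Int) : List (List Char) :=
  (PySem.List.pyRange 0 tl.length slen).map
    (fun i => PySem.List.slice tl (some i) (some (i + slen)))

-- A's loop body: state (cnt, ans); a == b, then emit str(cnt)+a[0] or a[0].
-- a[0] on the singleton list a is always in range; ported as pyGetD _ 0 [] (exact here).
def checkStep (st : Int × List Char) (p : List (List Char) × List (List Char)) :
    Int × List Char :=
  if p.1 == p.2 then (st.1 + 1, st.2)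
  else (1, st.2 ++ (if st.1 > 1 then PySem.Int.toChars st.1 ++ PySem.List.pyGetD p.1 0 []
                    else PySem.List.pyGetD p.1 0 []))

def check (text : String) (slen : Int) : String :=
  let textzip : List (List (List Char)) := (checkChunks text.toList slen).map (fun c => [c])
  -- Python's '' sentinel is compared (always unequally) against singleton lists [chunk];
  -- it is modelled as the empty list [], which is likewise never equal to a singleton — exact.
  let st := (List.zip textzip (textzip.drop 1 ++ [([] : List (List Char))])).foldl checkStep (1, [])
  String.ofList st.2

-- ===== PORT B =====
-- B's outer while: chunks[i..j) is the run of chunks equal to chunks[i] (inner while =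
-- takeWhile/dropWhile), emit str(cnt)+chunk or chunk, advance i to j; ''.join = flatten.
def checkRuns : List (List Char) → List (List Char)
  | [] => []
  | x :: xs =>
    let cnt : Int := ((xs.takeWhile (· == x)).length : Int) + 1
    (if cnt > 1 then PySem.Int.toChars cnt ++ x else x) :: checkRuns (xs.dropWhile (· == x))
termination_by l => l.length
decreasing_by
  simpa using Nat.lt_succ_of_le (List.length_dropWhile_le _ _)

def check_alt (text : String) (slen : Int) : String :=
  String.ofList ((checkRuns (checkChunks text.toList slen)).flatten)

-- ===== PRECONDITION & SPEC =====
-- Pre_ excludes exactly slen = 0, where Python's range(0, len(text), 0) raises ValueError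
-- (in A and in B alike).
def Pre_check (text : String) (slen : Int) : Prop := slen ≠ 0
instance (text : String) (slen : Int) : Decidable (Pre_check text slen) := by
  unfold Pre_check; infer_instance

def pvWitness_check : String × Int := ("aaab", 1)

def Spec_check (text : String) (slen : Int) (out : String) : Prop := out = check_alt text slen
instance (text : String) (slen : Int) (out : String) : Decidable (Spec_check text slen out) := by
  unfold Spec_check; infer_instance

-- ===== CLAIM (what is proved, stated in full; the proofs are below) =====
def Claim_equal_check : Prop :=
  ∀ (text : String) (slen : Int), Dom_check text slen → Pre_check text slen →
    Spec_check text slen (check text slen)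

-- ===== LEMMAS AND PROOFS =====

-- the emitted piece for one run of length cnt
def checkEmit (cnt : Int) (x : List Char) : List Char :=
  if cnt > 1 then PySem.Int.toChars cnt ++ x else x

theorem checkRuns_cons (x : List Char) (xs : List (List Char)) :
    checkRuns (x :: xs) =
      checkEmit (((xs.takeWhile (· == x)).length : Int) + 1) x ::
        checkRuns (xs.dropWhile (· == x)) := by
  rw [checkRuns]; rfl

-- A's fold over the shifted zip, with the head run already counted cnt times,
-- equals ans plus B's run encoding with the head run's count boosted accordingly.
theorem check_loop_eq (xs : List (List Char)) : ∀ (x : List Char) (cnt : Int) (ans : List Char),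
    ((List.zip ([x] :: xs.map (fun c => [c]))
        ((xs.map (fun c => [c])) ++ [([] : List (List Char))])).foldl checkStep (cnt, ans)).2
      = ans ++ checkEmit (((xs.takeWhile (· == x)).length : Int) + cnt) x
            ++ (checkRuns (xs.dropWhile (· == x))).flatten := by
  induction xs with
  | nil =>
    intro x cnt ans
    simp [checkStep, checkRuns, checkEmit, PySem.List.pyGetD_zero_cons]
  | cons y ys ih =>
    intro x cnt ans
    by_cases h : y = x
    · subst h
      simp only [List.map_cons, List.zip_cons_cons, List.foldl_cons, List.cons_append,
        List.takeWhile, List.dropWhile, beq_self_eq_true]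
      rw [show checkStep (cnt, ans) ([y], [y]) = (cnt + 1, ans) from by simp [checkStep]]
      rw [ih y (cnt + 1) ans]
      have harg : ((List.takeWhile (· == y) ys).length : Int) + (cnt + 1)
          = (((y :: List.takeWhile (· == y) ys).length : Int)) + cnt := by
        simp; ring
      rw [harg]
    · have hbeq : ([x] == [y]) = false := by
        simp
        exact fun hxy => h hxy.symm
      have hbeq' : (y == x) = false := by simp [h]
      simp only [List.map_cons, List.zip_cons_cons, List.foldl_cons, List.cons_append,
        List.takeWhile, List.dropWhile, hbeq']
      rw [show checkStep (cnt, ans) ([x], [y]) = (1, ans ++ checkEmit cnt x) from by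
        simp [checkStep, hbeq, checkEmit, PySem.List.pyGetD_zero_cons]]
      rw [ih y 1 (ans ++ checkEmit cnt x)]
      rw [checkRuns_cons]
      simp [checkEmit]

theorem check_eq_alt (t : String) (slen : Int) : check t slen = check_alt t slen := by
  unfold check check_alt
  cases hc : checkChunks t.toList slen with
  | nil => simp [checkRuns]
  | cons x xs =>
    simp only [List.map_cons, List.drop_succ_cons, List.drop_zero]
    rw [check_loop_eq xs x 1 []]
    rw [checkRuns_cons]
    simp

-- ===== VERDICT (by name: the statement is the Claim_ definition above) =====
theorem check_spec : Claim_equal_check := by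
  intro text slen _ _
  unfold Spec_check
  exact check_eq_alt text slen
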